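-- pv_equiv track=rewrite | github.com/ulelab/cv_coverage | cv_coverage.py | get_positions
-- ===== SOURCE A (Python) =====
-- def get_positions(s, kmer):
--     def find_all(a_str, sub):
--         """find indices of the substring in a string"""
--         start = 0
--         while True:
--             start = a_str.find(sub, start)
--             if start == -1: return
--             yield start
--             start += 1
--     # for each sliding window we find which positions fit into each motif
--     indices_extended = []
--     indices = list(find_all(s, kmer))
--     for i in indices:
--         indices_extended.extend(range(i, (i + len(kmer))))
--     position = [1 if x in set(indices_extended) else 0 for x in range(len(s))]
--     # number of positions is summed up into score for the current window
--     # score of the window with max score is returned, called h_max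
--     return position
-- ===== SOURCE B (Python) =====
-- def get_positions(s, kmer):
--     # difference array: +1 at each match start, -1 just past its end; prefix-sum to 0/1
--     n, k = len(s), len(kmer)
--     diff = [0] * (n + 1)
--     if k:
--         for i in range(n - k + 1):
--             if s[i:i+k] == kmer:
--                 diff[i] += 1
--                 diff[i + k] -= 1
--     out = []
--     c = 0
--     for x in range(n):
--         c += diff[x]
--         out.append(1 if c > 0 else 0)
--     return out
-- ===== Notes on version B (the rewrite author's own statement) =====
-- stated objective: faster
-- what changed: Replaces find-all occurrences + extend ranges + per-position set-membership test with a difference array (+1 at each match start, -1 past its end) and one prefix-sum pass producing the 0/1 list.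
import Mathlib
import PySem

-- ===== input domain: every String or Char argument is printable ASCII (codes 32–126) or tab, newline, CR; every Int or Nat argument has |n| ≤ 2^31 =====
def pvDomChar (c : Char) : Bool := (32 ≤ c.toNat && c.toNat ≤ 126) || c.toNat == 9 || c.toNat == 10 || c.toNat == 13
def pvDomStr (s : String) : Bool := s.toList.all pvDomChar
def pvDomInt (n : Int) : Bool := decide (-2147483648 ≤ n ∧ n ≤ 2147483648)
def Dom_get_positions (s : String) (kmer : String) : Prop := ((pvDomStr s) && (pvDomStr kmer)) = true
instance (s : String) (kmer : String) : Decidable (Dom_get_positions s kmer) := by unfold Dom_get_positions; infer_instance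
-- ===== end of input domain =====

-- B replaces A's find-all / extend-ranges / per-position set-membership pipeline with a
-- difference array (+1 at each match start, -1 past its end) followed by one prefix-sum
-- pass producing the 0/1 list (objective: faster).

-- ===== PORT A =====
-- find_all generator: repeated s.find(kmer, start) with start advanced past each hit.
-- Fuel only makes the Python while-loop total; s.length + 1 iterations always suffice
-- (start strictly increases and find returns -1 once start exceeds the last hit).
def findAllAux (s sub : List Char) (start : Int) : Nat → List Int
  | 0 => []
  | fuel + 1 =>
    if PySem.Chars.findFrom s sub start none = -1 then []
    else (PySem.Chars.findFrom s sub start none) ::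
      findAllAux s sub (PySem.Chars.findFrom s sub start none + 1) fuel

def get_positions (s : String) (kmer : String) : List Int :=
  (PySem.List.pyRange 0 (PySem.Str.len s : Int) 1).map
    (fun x => if PySem.Set.contains
        (PySem.Set.ofList ((findAllAux s.toList kmer.toList 0 (s.toList.length + 1)).foldl
          (fun acc i => acc ++ PySem.List.pyRange i (i + (PySem.Str.len kmer : Int)) 1) []))
        x then (1 : Int) else 0)

-- ===== PORT B =====
-- the difference array: +1 at each match start i, -1 at i + k  (Source B's first loop)
def dArr (s : String) (kmer : String) : List Int :=
  if kmer.toList.length ≠ 0 then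
    (List.range (s.toList.length - kmer.toList.length + 1)).foldl
      (fun d (i : Nat) =>
        if PySem.List.slice s.toList (some (i : Int))
            (some ((i : Int) + (kmer.toList.length : Int))) = kmer.toList then
          (d.modify i (· + 1)).modify (i + kmer.toList.length) (· - 1)
        else d)
      (List.replicate (s.toList.length + 1) 0)
  else List.replicate (s.toList.length + 1) 0

-- prefix-sum pass: running count c, emit 1 iff c > 0  (Source B's second loop)
def get_positions_alt (s : String) (kmer : String) : List Int :=
  ((List.range s.toList.length).foldl
    (fun (st : Int × List Int) x =>
      (st.1 + (dArr s kmer).getD x 0,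
        st.2 ++ [if 0 < st.1 + (dArr s kmer).getD x 0 then (1 : Int) else 0]))
    (0, [])).2

-- ===== PRECONDITION & SPEC =====
def Spec_get_positions (s : String) (kmer : String) (out : List Int) : Prop := out = get_positions_alt s kmer
instance (s : String) (kmer : String) (out : List Int) : Decidable (Spec_get_positions s kmer out) := by unfold Spec_get_positions; infer_instance

-- ===== CLAIM (what is proved, stated in full; the proofs are below) =====
def Claim_equal_get_positions : Prop := ∀ (s : String) (kmer : String), Dom_get_positions s kmer → Spec_get_positions s kmer (get_positions s kmer)

-- ===== LEMMAS AND PROOFS =====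

-- membership in the list produced by find_all: exactly the occurrence starts ≥ start
lemma mem_findAllAux (s sub : List Char) (hsub : sub ≠ []) :
    ∀ (fuel start : Nat), start ≤ s.length → s.length - start < fuel →
      ∀ x : Int, (x ∈ findAllAux s sub (start : Int) fuel ↔
        ∃ j : Nat, x = (j : Int) ∧ start ≤ j ∧ sub <+: s.drop j) := by
  intro fuel
  induction fuel with
  | zero => intro start _ hf; omega
  | succ f ih =>
    intro start hstart hfuel x
    by_cases hr : PySem.Chars.findFrom s sub (start : Int) none = -1
    · rw [findAllAux, if_pos hr]
      simp only [List.not_mem_nil, false_iff]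
      rw [PySem.Chars.findFrom_natCast_eq_neg_one_iff s sub start hstart] at hr
      rintro ⟨j, rfl, hj, hpre⟩
      apply hr
      apply (PySem.Chars.isIn_iff_infix sub (s.drop start)).mp
      apply (PySem.Chars.exists_prefix_drop_iff_isIn sub (s.drop start)).mp
      refine ⟨j - start, ?_⟩
      have hje : start + (j - start) = j := by omega
      simpa [List.drop_drop, hje] using hpre
    · obtain ⟨hle, hpre, hmin⟩ := PySem.Chars.findFrom_natCast_spec s sub start hstart hr
      rw [findAllAux, if_neg hr]
      set r := PySem.Chars.findFrom s sub (start : Int) none with hrdef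
      have hr0 : (0 : Int) ≤ r := by omega
      have hrcast : r = (r.toNat : Int) := by omega
      have hrlt : r.toNat < s.length := by
        have hne : s.drop r.toNat ≠ [] := by
          intro h0; rw [h0] at hpre; exact hsub (List.prefix_nil.mp hpre)
        have hpos : 0 < (s.drop r.toNat).length := List.length_pos_of_ne_nil hne
        simp only [List.length_drop] at hpos
        omega
      have hstep : r + 1 = ((r.toNat + 1 : Nat) : Int) := by omega
      rw [List.mem_cons, hstep, ih (r.toNat + 1) (by omega) (by omega) x]
      constructor
      · rintro (rfl | ⟨j, rfl, hj, hp⟩)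
        · exact ⟨r.toNat, hrcast, by omega, hpre⟩
        · exact ⟨j, rfl, by omega, hp⟩
      · rintro ⟨j, rfl, hj, hp⟩
        by_cases hjr : j = r.toNat
        · subst hjr; exact Or.inl hrcast.symm
        · right
          refine ⟨j, rfl, ?_, hp⟩
          by_contra hlt
          exact hmin j (by omega) (by omega) hp

lemma prefix_iff_take (cs km : List Char) (j : Nat) :
    (PySem.List.slice cs (some (j : Int)) (some ((j : Int) + (km.length : Int))) = km) ↔
      km <+: cs.drop j := by
  rw [PySem.List.slice_natCast_add]
  constructor
  · intro h; exact h ▸ List.take_prefix _ _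
  · intro h
    have := List.prefix_iff_eq_take.mp h
    exact this.symm

-- an occurrence of a nonempty kmer fits inside the string
lemma prefix_len (cs km : List Char) (hk : km ≠ []) (j : Nat) (h : km <+: cs.drop j) :
    j + km.length ≤ cs.length := by
  have h1 : km.length ≤ (cs.drop j).length := h.length_le
  have h2 : 0 < km.length := List.length_pos_of_ne_nil hk
  simp only [List.length_drop] at h1
  omega

-- characterisation of A's indices_extended membership (kmer nonempty)
lemma mem_extended (cs km : List Char) (hk : km ≠ []) (x : Int) :
    (x ∈ (findAllAux cs km 0 (cs.length + 1)).foldl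
        (fun acc i => acc ++ PySem.List.pyRange i (i + (km.length : Int)) 1) []) ↔
      ∃ j : Nat, (j : Int) ≤ x ∧ x < (j : Int) + km.length ∧ km <+: cs.drop j := by
  rw [PySem.List.foldl_append_eq_flatMap, List.nil_append, List.mem_flatMap]
  constructor
  · rintro ⟨i, hi, hx⟩
    rw [show (0 : Int) = ((0 : Nat) : Int) from rfl] at hi
    obtain ⟨j, rfl, _, hpre⟩ :=
      (mem_findAllAux cs km hk (cs.length + 1) 0 (Nat.zero_le _) (by omega) i).mp hi
    rw [PySem.List.mem_pyRange_one] at hx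
    exact ⟨j, hx.1, hx.2, hpre⟩
  · rintro ⟨j, h1, h2, hpre⟩
    refine ⟨(j : Int), ?_, ?_⟩
    · rw [show (0 : Int) = ((0 : Nat) : Int) from rfl]
      exact (mem_findAllAux cs km hk (cs.length + 1) 0 (Nat.zero_le _) (by omega) _).mpr
        ⟨j, rfl, Nat.zero_le _, hpre⟩
    · rw [PySem.List.mem_pyRange_one]; exact ⟨h1, h2⟩

-- ===== B-side: the difference array and its prefix sums =====

-- +1 contribution of a match starting at p
def posf (cs km : List Char) (p : Nat) : Int := if km <+: cs.drop p then 1 else 0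

-- final value of the difference array at p
def gfun (cs km : List Char) (p : Nat) : Int :=
  posf cs km p - (if km.length ≤ p ∧ km <+: cs.drop (p - km.length) then 1 else 0)

-- what the first loop builds, entry by entry
lemma diff_char (cs km : List Char) (hk : km ≠ []) :
    ∀ m : Nat,
      ((List.range m).foldl
        (fun d (i : Nat) =>
          if PySem.List.slice cs (some (i : Int)) (some ((i : Int) + (km.length : Int))) = km then
            (d.modify i (· + 1)).modify (i + km.length) (· - 1)
          else d)
        (List.replicate (cs.length + 1) 0)) =
      (List.range (cs.length + 1)).map
        (fun p => (if p < m ∧ km <+: cs.drop p then (1 : Int) else 0) -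
          (if km.length ≤ p ∧ p - km.length < m ∧ km <+: cs.drop (p - km.length) then 1 else 0)) := by
  have hk1 : 0 < km.length := List.length_pos_of_ne_nil hk
  intro m
  induction m with
  | zero =>
    simp only [List.range_zero, List.foldl_nil]
    apply List.ext_getElem (by simp)
    intro p hp1 hp2
    simp
  | succ m ih =>
    rw [List.range_succ, List.foldl_append, List.foldl_cons, List.foldl_nil, ih]
    by_cases hocc : km <+: cs.drop m
    · rw [if_pos ((prefix_iff_take cs km m).mpr hocc)]
      apply List.ext_getElem (by simp)
      intro p hp1 hp2
      simp only [List.length_map, List.length_range] at hp2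
      rw [List.getElem_modify, List.getElem_modify]
      simp only [List.getElem_map, List.getElem_range]
      by_cases hP1 : km <+: cs.drop p
      · by_cases hP2 : km <+: cs.drop (p - km.length)
        · simp only [hP1, hP2, and_true, true_and]
          split_ifs <;> omega
        · have hpmk : p ≠ m + km.length := by
            intro h; exact hP2 (by rw [h, Nat.add_sub_cancel]; exact hocc)
          simp only [hP1, hP2, and_true, true_and, and_false, if_false]
          split_ifs <;> omega
      · have hpm : p ≠ m := fun h => hP1 (h ▸ hocc)
        by_cases hP2 : km <+: cs.drop (p - km.length)
        · simp only [hP1, hP2, and_true, true_and, and_false, if_false]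
          split_ifs <;> omega
        · have hpmk : p ≠ m + km.length := by
            intro h; exact hP2 (by rw [h, Nat.add_sub_cancel]; exact hocc)
          simp only [hP1, hP2, and_false, if_false]
          split_ifs <;> omega
    · rw [if_neg (fun hc => hocc ((prefix_iff_take cs km m).mp hc))]
      apply List.ext_getElem (by simp)
      intro p hp1 hp2
      simp only [List.getElem_map, List.getElem_range]
      by_cases hP1 : km <+: cs.drop p
      · have hpm : p ≠ m := fun h => hocc (h ▸ hP1)
        by_cases hP2 : km <+: cs.drop (p - km.length)
        · have hpmk : p - km.length ≠ m := fun h => hocc (h ▸ hP2)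
          simp only [hP1, hP2, and_true, true_and]
          split_ifs <;> omega
        · simp only [hP1, hP2, and_true, true_and, and_false, if_false]
          split_ifs <;> omega
      · by_cases hP2 : km <+: cs.drop (p - km.length)
        · have hpmk : p - km.length ≠ m := fun h => hocc (h ▸ hP2)
          simp only [hP1, hP2, and_true, true_and, and_false, if_false]
          split_ifs <;> omega
        · simp only [hP1, hP2, and_false, if_false]

-- the finished difference array reads back as gfun
lemma dArr_getD (s kmer : String) (hk : kmer.toList ≠ []) (x : Nat) (hx : x < s.toList.length) :
    (dArr s kmer).getD x 0 = gfun s.toList kmer.toList x := by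
  have hk1 : 0 < kmer.toList.length := List.length_pos_of_ne_nil hk
  unfold dArr
  rw [if_pos (by omega), diff_char s.toList kmer.toList hk (s.toList.length - kmer.toList.length + 1)]
  rw [List.getD_eq_getElem _ _ (by simp only [List.length_map, List.length_range, List.length_replicate]; omega)]
  simp only [List.getElem_map, List.getElem_range]
  unfold gfun posf
  by_cases hP1 : kmer.toList <+: s.toList.drop x
  · have hb1 := prefix_len s.toList kmer.toList hk x hP1
    by_cases hP2 : kmer.toList <+: s.toList.drop (x - kmer.toList.length)
    · have hb2 := prefix_len s.toList kmer.toList hk _ hP2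
      simp only [hP1, hP2, and_true, true_and]
      split_ifs <;> omega
    · simp only [hP1, hP2, and_true, true_and, and_false, if_false]
      split_ifs <;> omega
  · by_cases hP2 : kmer.toList <+: s.toList.drop (x - kmer.toList.length)
    · have hb2 := prefix_len s.toList kmer.toList hk _ hP2
      simp only [hP1, hP2, and_true, true_and, and_false, if_false]
      split_ifs <;> omega
    · simp only [hP1, hP2, and_false, if_false]

-- the -1 entries telescope: their prefix sums are shifted prefix sums of posf
lemma neg_sum (cs km : List Char) (hk : km ≠ []) (m : Nat) :
    (∑ p ∈ Finset.range m,
        (if km.length ≤ p ∧ km <+: cs.drop (p - km.length) then (1 : Int) else 0)) =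
      ∑ q ∈ Finset.range (m - km.length), posf cs km q := by
  have hk1 : 0 < km.length := List.length_pos_of_ne_nil hk
  induction m with
  | zero => simp
  | succ m ih =>
    rw [Finset.sum_range_succ, ih]
    by_cases hkm : km.length ≤ m
    · have h1 : m + 1 - km.length = (m - km.length) + 1 := by omega
      rw [h1, Finset.sum_range_succ]
      unfold posf
      simp only [hkm, true_and]
    · have h1 : m + 1 - km.length = m - km.length := by omega
      rw [h1, if_neg (by omega), add_zero]

-- running count after x+1 steps is positive iff position x is covered
lemma C_pos_iff (cs km : List Char) (hk : km ≠ []) (x : Nat) :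
    (0 < ∑ p ∈ Finset.range (x + 1), gfun cs km p) ↔
      ∃ j : Nat, km <+: cs.drop j ∧ j ≤ x ∧ x < j + km.length := by
  have hk1 : 0 < km.length := List.length_pos_of_ne_nil hk
  have hsum : (∑ p ∈ Finset.range (x + 1), gfun cs km p) =
      ∑ p ∈ Finset.Ico (x + 1 - km.length) (x + 1), posf cs km p := by
    unfold gfun
    rw [Finset.sum_sub_distrib, neg_sum cs km hk,
      Finset.sum_Ico_eq_sub _ (by omega : x + 1 - km.length ≤ x + 1)]
  rw [hsum]
  constructor
  · intro hpos
    by_contra hno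
    push_neg at hno
    have hzero : ∑ p ∈ Finset.Ico (x + 1 - km.length) (x + 1), posf cs km p = 0 := by
      apply Finset.sum_eq_zero
      intro q hq
      rw [Finset.mem_Ico] at hq
      unfold posf
      rw [if_neg]
      intro hp
      exact absurd (hno q hp (by omega)) (by omega)
    omega
  · rintro ⟨j, hpre, hj1, hj2⟩
    apply Finset.sum_pos'
    · intro i _; unfold posf; split_ifs <;> omega
    · refine ⟨j, Finset.mem_Ico.mpr (by omega), ?_⟩
      unfold posf; rw [if_pos hpre]; omega

-- the prefix-sum loop, as a whole
lemma scan_inv (d : List Int) (g : Nat → Int) (n : Nat)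
    (hd : ∀ x, x < n → d.getD x 0 = g x) :
    ∀ m, m ≤ n →
      ((List.range m).foldl
        (fun (st : Int × List Int) x =>
          (st.1 + d.getD x 0, st.2 ++ [if 0 < st.1 + d.getD x 0 then (1 : Int) else 0]))
        (0, [])) =
      (∑ p ∈ Finset.range m, g p,
        (List.range m).map (fun x => if 0 < ∑ p ∈ Finset.range (x + 1), g p then (1 : Int) else 0)) := by
  intro m
  induction m with
  | zero => intro _; simp
  | succ m ih =>
    intro hm
    rw [List.range_succ, List.foldl_append, List.foldl_cons, List.foldl_nil, ih (by omega)]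
    simp only [List.map_append, List.map_cons, List.map_nil]
    rw [hd m (by omega), ← Finset.sum_range_succ]

theorem get_positions_eq (s kmer : String) : get_positions s kmer = get_positions_alt s kmer := by
  unfold get_positions get_positions_alt
  by_cases hk : kmer.toList.length ≠ 0
  · have hkne : kmer.toList ≠ [] := by
      intro h; rw [h] at hk; exact hk rfl
    rw [scan_inv (dArr s kmer) (gfun s.toList kmer.toList) s.toList.length
      (fun x hx => dArr_getD s kmer hkne x hx) s.toList.length (le_refl _)]
    have hlen : (PySem.Str.len s : Int) = (s.toList.length : Int) := by
      simp [PySem.Str.len]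
    rw [hlen, PySem.List.pyRange_one]
    simp only [Int.sub_zero, Int.toNat_natCast, List.map_map]
    apply List.ext_getElem (by simp)
    intro x hx1 hx2
    simp only [List.getElem_map, List.getElem_range, Function.comp_apply]
    have hset : PySem.Set.contains
        (PySem.Set.ofList ((findAllAux s.toList kmer.toList 0 (s.toList.length + 1)).foldl
          (fun acc i => acc ++ PySem.List.pyRange i (i + (PySem.Str.len kmer : Int)) 1) []))
        ((0 : Int) + (x : Int)) = true ↔
        ((0 : Int) + (x : Int)) ∈ ((findAllAux s.toList kmer.toList 0 (s.toList.length + 1)).foldl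
          (fun acc i => acc ++ PySem.List.pyRange i (i + (PySem.Str.len kmer : Int)) 1) []) := by
      simp [PySem.Set.contains, PySem.Set.mem_ofList]
    have hlenk : (PySem.Str.len kmer : Int) = (kmer.toList.length : Int) := by
      simp [PySem.Str.len]
    rw [hlenk] at hset
    simp only [hlenk]
    by_cases hcov : ∃ j : Nat, kmer.toList <+: s.toList.drop j ∧ j ≤ x ∧ x < j + kmer.toList.length
    · rw [if_pos ((C_pos_iff s.toList kmer.toList hkne x).mpr hcov), if_pos]
      rw [hset, mem_extended s.toList kmer.toList hkne]
      obtain ⟨j, hpre, h1, h2⟩ := hcov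
      exact ⟨j, by omega, by omega, hpre⟩
    · rw [if_neg (fun hc => hcov ((C_pos_iff s.toList kmer.toList hkne x).mp hc)), if_neg]
      rw [hset, mem_extended s.toList kmer.toList hkne]
      rintro ⟨j, h1, h2, hpre⟩
      exact hcov ⟨j, hpre, by omega, by omega⟩
  · -- kmer empty: the difference array is all zeros and A's extension ranges are empty
    rw [Ne, not_not] at hk
    have hlenk : (PySem.Str.len kmer : Int) = 0 := by
      simp [PySem.Str.len, hk]
    have hdz : ∀ x, x < s.toList.length → (dArr s kmer).getD x 0 = (fun _ : Nat => (0 : Int)) x := by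
      intro x hx
      unfold dArr
      rw [if_neg (by omega)]
      rw [List.getD_eq_getElem _ _ (by simp only [List.length_map, List.length_range, List.length_replicate]; omega)]
      simp
    rw [scan_inv (dArr s kmer) (fun _ => 0) s.toList.length hdz s.toList.length (le_refl _)]
    have hext : (findAllAux s.toList kmer.toList 0 (s.toList.length + 1)).foldl
        (fun acc i => acc ++ PySem.List.pyRange i (i + (PySem.Str.len kmer : Int)) 1) []
        = ([] : List Int) := by
      rw [hlenk]
      induction findAllAux s.toList kmer.toList 0 (s.toList.length + 1) with
      | nil => rfl
      | cons a l ihl =>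
        rw [List.foldl_cons, PySem.List.pyRange_one_eq_nil (by omega), List.append_nil, ihl]
    rw [hext]
    have hlen : (PySem.Str.len s : Int) = (s.toList.length : Int) := by
      simp [PySem.Str.len]
    rw [hlen, PySem.List.pyRange_one]
    apply List.ext_getElem (by simp)
    intro x hx1 hx2
    simp [PySem.Set.contains]

-- ===== VERDICT (by name: the statement is the Claim_ definition above) =====
theorem get_positions_spec : Claim_equal_get_positions := by
  intro s kmer _
  unfold Spec_get_positions
  exact get_positions_eq s kmer
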